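-- pv_equiv track=rewrite | github.com/Elizabeth3918/CSA_Lab2 | AOCElza_2.py | add_mod_2
-- ===== SOURCE A (Python) =====
-- BITNESS = 26  # битность чисел
--
-- def add_mod_2(a, b):
--     temp = 0
--     for i in range((BITNESS + 8) // 8):
--         temp <<= 8
--         for j in range(8):
--             temp |= b & (1 << j)
--
--     temp_res = a ^ temp
--
--     res = 0
--     for i in range(0, BITNESS):
--         res |= temp_res & (1 << i)
--     return res
-- ===== SOURCE B (Python) =====
-- BITNESS = 26  # битность чисел
--
-- def add_mod_2(a, b):
--     # closed form: replicate b's low byte into 4 bytes, xor, mask to BITNESS bits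
--     return (a ^ ((b & 0xFF) * 0x01010101)) & ((1 << BITNESS) - 1)
-- ===== Notes on version B (the rewrite author's own statement) =====
-- stated objective: simpler
-- what changed: Replaced the three bit-by-bit loops (byte replication, per-bit masking) by one closed-form expression: (a ^ ((b & 0xFF) * 0x01010101)) & ((1 << 26) - 1).
import Mathlib
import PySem

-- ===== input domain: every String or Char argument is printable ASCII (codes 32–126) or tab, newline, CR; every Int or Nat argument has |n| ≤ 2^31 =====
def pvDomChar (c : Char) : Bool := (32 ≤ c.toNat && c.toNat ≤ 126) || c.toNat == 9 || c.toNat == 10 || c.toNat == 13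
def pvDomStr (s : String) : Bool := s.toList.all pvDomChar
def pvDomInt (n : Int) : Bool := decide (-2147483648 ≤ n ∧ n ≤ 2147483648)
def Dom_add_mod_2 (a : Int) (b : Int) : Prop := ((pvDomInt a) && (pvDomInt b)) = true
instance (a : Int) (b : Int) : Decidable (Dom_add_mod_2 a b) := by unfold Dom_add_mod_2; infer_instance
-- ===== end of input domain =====

-- B replaces A's three bit-by-bit loops by the single closed-form expression
-- (a ^ ((b & 0xFF) * 0x01010101)) & ((1 << 26) - 1)  (objective: simpler).

-- ===== PORT A =====
-- literal port of A; BITNESS = 26 is inlined, range((BITNESS+8)//8) = List.range ((26+8)/8),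
-- range(0, BITNESS) = List.range 26 (bounds are nonnegative literals); shift amounts are Nat.
def add_mod_2 (a : Int) (b : Int) : Int :=
  let temp : Int :=
    (List.range ((26 + 8) / 8)).foldl
      (fun temp _ =>
        (List.range 8).foldl
          (fun (temp : Int) (j : Nat) => PySem.Int.bor temp (PySem.Int.band b ((1 : Int) <<< j)))
          (temp <<< (8 : Nat)))
      0
  let temp_res : Int := PySem.Int.bxor a temp
  (List.range 26).foldl
    (fun (res : Int) (i : Nat) => PySem.Int.bor res (PySem.Int.band temp_res ((1 : Int) <<< i)))
    0

-- ===== PORT B =====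
def add_mod_2_alt (a : Int) (b : Int) : Int :=
  PySem.Int.band (PySem.Int.bxor a (PySem.Int.band b 255 * 16843009))
    (((1 : Int) <<< (26 : Nat)) - 1)

-- ===== PRECONDITION & SPEC =====
def Spec_add_mod_2 (a : Int) (b : Int) (out : Int) : Prop := out = add_mod_2_alt a b
instance (a : Int) (b : Int) (out : Int) : Decidable (Spec_add_mod_2 a b out) := by unfold Spec_add_mod_2; infer_instance

-- ===== CLAIM (what is proved, stated in full; the proofs are below) =====
def Claim_equal_add_mod_2 : Prop := ∀ (a : Int) (b : Int), Dom_add_mod_2 a b → Spec_add_mod_2 a b (add_mod_2 a b)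

-- ===== LEMMAS AND PROOFS =====

-- Python's bit i of an arbitrary integer (infinite two's complement).
def pvBit (x : Int) (i : Nat) : Bool :=
  if 0 ≤ x then x.toNat.testBit i else !((-x - 1).toNat.testBit i)

-- the low k bits of x as a natural number
def pvLow (x : Int) (k : Nat) : Nat :=
  if 0 ≤ x then x.toNat % 2 ^ k else (2 ^ k - 1) ^^^ ((-x - 1).toNat % 2 ^ k)

theorem pvLorAdd (a : Nat) : ∀ (b : Nat), a &&& b = 0 → a ||| b = a + b := by
  induction a using Nat.strong_induction_on with
  | _ a ih =>
    intro b h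
    rcases Nat.eq_zero_or_pos a with ha | ha
    · simp [ha]
    · have hd : a / 2 &&& b / 2 = 0 := by rw [← Nat.and_div_two, h]
      have ih2 := ih (a / 2) (Nat.div_lt_self ha (by norm_num)) (b / 2) hd
      have hm : ¬ (a % 2 = 1 ∧ b % 2 = 1) := by
        have t := Nat.testBit_land a b 0
        rw [h] at t
        simp [Nat.testBit_zero] at t
        omega
      have h2 : (a ||| b) % 2 = 1 ↔ (a % 2 = 1 ∨ b % 2 = 1) := by
        have t := Nat.testBit_lor a b 0
        simp only [Nat.testBit_zero, ← Bool.decide_or, decide_eq_decide] at t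
        exact t
      have h1 : (a ||| b) / 2 = a / 2 + b / 2 := by rw [Nat.or_div_two, ih2]
      omega

theorem pvLow_testBit (x : Int) (k j : Nat) :
    (pvLow x k).testBit j = (decide (j < k) && pvBit x j) := by
  unfold pvLow pvBit
  split_ifs with hx
  · simp [Nat.testBit_mod_two_pow]
  · simp only [Nat.testBit_xor, Nat.testBit_two_pow_sub_one, Nat.testBit_mod_two_pow]
    by_cases hj : j < k <;> simp [hj]

theorem pvLow_lt (x : Int) (k : Nat) : pvLow x k < 2 ^ k := by
  unfold pvLow
  split_ifs with hx
  · exact Nat.mod_lt _ (Nat.two_pow_pos k)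
  · exact Nat.xor_lt_two_pow (by have := Nat.two_pow_pos k; omega)
      (Nat.mod_lt _ (Nat.two_pow_pos k))

theorem pvBitTerm_testBit (t : Bool) (j k : Nat) :
    (t.toNat * 2 ^ j).testBit k = (t && decide (j = k)) := by
  cases t <;> simp [Nat.testBit_two_pow]

-- Python's  x & (1 << i)  extracts bit i
theorem pvBandPow (x : Int) (i : Nat) :
    PySem.Int.band x ((1 : Int) <<< i) = (((pvBit x i).toNat * 2 ^ i : Nat) : Int) := by
  have hs : ((1 : Int) <<< i) = ((2 ^ i : Nat) : Int) := by
    rw [Int.shiftLeft_eq]; push_cast; ring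
  rw [hs]
  unfold PySem.Int.band pvBit
  split_ifs with hx hp hp
  · simp only [Int.toNat_natCast, Nat.and_two_pow]
  · exact absurd (by positivity) hp
  · simp only [Int.toNat_natCast]
    rw [Nat.land_comm, Nat.and_two_pow]
    cases hb : ((-x - 1).toNat.testBit i) <;> simp
  · exact absurd (by positivity) hp

theorem pvStep (x : Int) (j : Nat) :
    pvLow x j ||| (pvBit x j).toNat * 2 ^ j = pvLow x (j + 1) := by
  apply Nat.eq_of_testBit_eq
  intro k
  simp only [Nat.testBit_lor, pvLow_testBit, pvBitTerm_testBit]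
  by_cases h1 : k < j
  · have : k ≠ j := by omega
    simp [h1, Nat.lt_succ_of_lt h1, Ne.symm this]
  · by_cases h2 : j = k
    · subst h2; simp
    · have : ¬ k < j + 1 := by omega
      simp [h1, h2, this]

-- the bit-collecting loop, with an arbitrary nonnegative start value C
theorem pvLoop (x : Int) (k : Nat) (C : Nat) :
    (List.range k).foldl
      (fun (r : Int) (i : Nat) => PySem.Int.bor r (PySem.Int.band x ((1 : Int) <<< i))) ((C : Nat) : Int)
      = ((C ||| pvLow x k : Nat) : Int) := by
  induction k with
  | zero =>
    have h0 : pvLow x 0 = 0 := by unfold pvLow; split_ifs <;> simp [Nat.mod_one]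
    simp [h0]
  | succ k ihk =>
    rw [List.range_succ, List.foldl_append, ihk]
    simp only [List.foldl_cons, List.foldl_nil]
    rw [pvBandPow, PySem.Int.bor_natCast, Nat.lor_assoc, pvStep]

theorem pvLoop0 (x : Int) (k : Nat) :
    (List.range k).foldl
      (fun (r : Int) (i : Nat) => PySem.Int.bor r (PySem.Int.band x ((1 : Int) <<< i))) 0
      = ((pvLow x k : Nat) : Int) := by
  simpa using pvLoop x k 0

-- a value with only bits ≥ 8 OR a value with only bits < 8 is their sum
theorem pvOrMul (T m : Nat) (hm : m < 2 ^ 8) : 2 ^ 8 * T ||| m = 2 ^ 8 * T + m := by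
  apply pvLorAdd
  apply Nat.eq_of_testBit_eq
  intro j
  simp only [Nat.testBit_land, Nat.zero_testBit]
  by_cases hj : j < 8
  · have h1 : (2 ^ 8 * T + 0).testBit j = false := by
      rw [Nat.testBit_two_pow_mul_add T (by positivity)]
      simp [hj]
    simpa using congrArg (· && m.testBit j) h1
  · have h2 : m.testBit j = false :=
      Nat.testBit_lt_two_pow (lt_of_lt_of_le hm (Nat.pow_le_pow_right (by norm_num) (by omega)))
    simp [h2]

-- one outer iteration of A's replication loop: temp = temp * 256 + (b & 0xFF)
theorem pvOutStep (b : Int) (T : Nat) :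
    (List.range 8).foldl
      (fun (temp : Int) (j : Nat) => PySem.Int.bor temp (PySem.Int.band b ((1 : Int) <<< j)))
      (((T : Nat) : Int) <<< (8 : Nat))
      = ((2 ^ 8 * T + pvLow b 8 : Nat) : Int) := by
  have hs : (((T : Nat) : Int) <<< (8 : Nat)) = ((2 ^ 8 * T : Nat) : Int) := by
    rw [Int.shiftLeft_eq]; push_cast; ring
  rw [hs, pvLoop, pvOrMul T (pvLow b 8) (pvLow_lt b 8)]

-- Python's  x & (2^k - 1)  is the low k bits
theorem pvBandMask (x : Int) (k : Nat) :
    PySem.Int.band x (((2 ^ k - 1 : Nat) : Int)) = ((pvLow x k : Nat) : Int) := by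
  unfold PySem.Int.band pvLow
  split_ifs with hx hp hp
  · simp only [Int.toNat_natCast]
    rw [Nat.and_two_pow_sub_one_eq_mod]
  · exact absurd (by positivity) hp
  · simp only [Int.toNat_natCast]
    rw [Nat.land_comm, Nat.and_two_pow_sub_one_eq_mod]
    -- (2^k - 1) - r = (2^k - 1) ^^^ r  for r < 2^k
    set r := (-x - 1).toNat % 2 ^ k with hr
    have hrlt : r < 2 ^ k := Nat.mod_lt _ (Nat.two_pow_pos k)
    have hone : (1 : Nat) ≤ 2 ^ k := Nat.one_le_two_pow
    have hbit : ∀ j, ¬ j < k → r.testBit j = false := fun j hj =>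
      Nat.testBit_lt_two_pow (lt_of_lt_of_le hrlt (Nat.pow_le_pow_right (by norm_num) (by omega)))
    have hand : ((2 ^ k - 1) ^^^ r) &&& r = 0 := by
      apply Nat.eq_of_testBit_eq
      intro j
      simp only [Nat.testBit_land, Nat.testBit_xor, Nat.testBit_two_pow_sub_one, Nat.zero_testBit]
      by_cases hj : j < k
      · cases hb : r.testBit j <;> simp [hj]
      · simp [hbit j hj]
    have hor : ((2 ^ k - 1) ^^^ r) ||| r = 2 ^ k - 1 := by
      apply Nat.eq_of_testBit_eq
      intro j
      simp only [Nat.testBit_lor, Nat.testBit_xor, Nat.testBit_two_pow_sub_one]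
      by_cases hj : j < k
      · cases hb : r.testBit j <;> simp [hj]
      · simp [hbit j hj, hj]
    have hadd := pvLorAdd _ r hand
    rw [hor] at hadd
    have : (2 ^ k - 1) ^^^ r = 2 ^ k - 1 - r := by omega
    rw [this]
  · exact absurd (by positivity) hp

-- A's replication loops compute (b & 0xFF) * 0x01010101
theorem pvTemp (b : Int) :
    (List.range ((26 + 8) / 8)).foldl
      (fun temp _ =>
        (List.range 8).foldl
          (fun (temp : Int) (j : Nat) => PySem.Int.bor temp (PySem.Int.band b ((1 : Int) <<< j)))
          (temp <<< (8 : Nat)))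
      0
      = ((pvLow b 8 * 16843009 : Nat) : Int) := by
  rw [show List.range ((26 + 8) / 8) = [0, 1, 2, 3] from rfl]
  simp only [List.foldl_cons, List.foldl_nil]
  rw [show (0 : Int) = ((0 : Nat) : Int) by simp, pvOutStep, pvOutStep, pvOutStep, pvOutStep]
  congr 1
  ring

-- ===== VERDICT (by name: the statement is the Claim_ definition above) =====
theorem add_mod_2_spec : Claim_equal_add_mod_2 := by
  intro a b _
  simp only [Spec_add_mod_2, add_mod_2, add_mod_2_alt]
  rw [pvTemp]
  have hb255 : (255 : Int) = ((2 ^ 8 - 1 : Nat) : Int) := by norm_num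
  have hmask : ((1 : Int) <<< (26 : Nat)) - 1 = ((2 ^ 26 - 1 : Nat) : Int) := by
    rw [Int.shiftLeft_eq]; norm_num
  have hcast : (((pvLow b 8 : Nat) : Int)) * 16843009 = ((pvLow b 8 * 16843009 : Nat) : Int) := by
    push_cast; ring
  rw [hb255, pvBandMask, hcast, hmask, pvBandMask, pvLoop0]
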